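-- pv_equiv track=rewrite | github.com/pypi-data/pypi-mirror-389 | packages/django-ixp-tracker/django_ixp_tracker-1.3.2.tar.gz/django_ixp_tracker-1.3.2/ixp_tracker/importers.py | dedupe_member_data
-- ===== SOURCE A (Python) =====
-- def dedupe_member_data(raw_members_data):
--     deduped_data = {}
--     for raw_member in raw_members_data:
--         member_key = str(raw_member["ix_id"]) + "-" + str(raw_member["asn"])
--         if deduped_data.get(member_key) is None:
--             deduped_data[member_key] = dict(raw_member)
--         else:
--             deduped_data[member_key]["is_rs_peer"] = deduped_data[member_key]["is_rs_peer"] or raw_member["is_rs_peer"]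
--             deduped_data[member_key]["speed"] += raw_member["speed"]
--     return list(deduped_data.values())
-- ===== SOURCE B (Python) =====
-- def dedupe_member_data(raw_members_data):
--     # Pass 1: index the raw records by their ix_id-asn key, keeping first-occurrence order.
--     groups = {}
--     for raw_member in raw_members_data:
--         member_key = str(raw_member["ix_id"]) + "-" + str(raw_member["asn"])
--         groups.setdefault(member_key, []).append(raw_member)
--     # Pass 2: reduce each group to a single record based on its first member.
--     result = []
--     for group in groups.values():
--         merged = dict(group[0])
--         for extra in group[1:]:
--             merged["is_rs_peer"] = merged["is_rs_peer"] or extra["is_rs_peer"]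
--         if len(group) > 1:
--             merged["speed"] = sum(record["speed"] for record in group)
--         result.append(merged)
--     return result
-- ===== Notes on version B (the rewrite author's own statement) =====
-- stated objective: alternative
-- what changed: Replaces A's single interleaved lookup-and-update aggregation loop with a two-pass group-then-reduce: first build an ordered dict mapping member key to the list of records sharing it, then reduce each group from dict(group[0]) by or-folding is_rs_peer over the tail and writing speed once as the sum over the whole group; Pre_ excludes exactly the inputs on which A raises KeyError (missing ix_id/asn, or aggregated fields missing where the duplicate-handling actually reads them).
import Mathlib
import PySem

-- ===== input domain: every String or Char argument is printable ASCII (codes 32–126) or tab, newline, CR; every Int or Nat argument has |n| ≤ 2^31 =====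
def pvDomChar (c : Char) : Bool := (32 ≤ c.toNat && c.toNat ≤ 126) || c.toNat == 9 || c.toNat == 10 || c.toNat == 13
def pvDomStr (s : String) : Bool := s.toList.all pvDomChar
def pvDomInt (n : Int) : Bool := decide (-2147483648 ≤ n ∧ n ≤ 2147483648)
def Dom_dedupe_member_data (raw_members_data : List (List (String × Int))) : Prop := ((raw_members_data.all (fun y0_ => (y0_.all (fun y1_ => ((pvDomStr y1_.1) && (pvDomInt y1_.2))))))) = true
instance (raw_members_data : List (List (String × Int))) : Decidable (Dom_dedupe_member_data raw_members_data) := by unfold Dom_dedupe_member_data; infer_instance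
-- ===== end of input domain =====

-- B replaces A's interleaved dict-update aggregation loop by a two-pass group-then-reduce (alternative decomposition, same cost); equivalence is about return values only.


-- ===== PORT A =====
-- Each record (a Python dict) is an association list; dict access r["x"] is first-match lookup.
-- A key that is missing (Python KeyError) is read as the default 0 here; exactly those inputs are
-- excluded by Pre_, so the ports are exact on the admitted inputs.
-- member_key = str(raw_member["ix_id"]) + "-" + str(raw_member["asn"])
def pvKeyA (r : List (String × Int)) : String :=
  PySem.Int.toStr ((PySem.Dict.mk r).getD "ix_id" 0) ++ "-" ++ PySem.Int.toStr ((PySem.Dict.mk r).getD "asn" 0)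

-- A's else branch: d["is_rs_peer"] = d["is_rs_peer"] or raw["is_rs_peer"]; d["speed"] += raw["speed"]
-- (Python's `or` on ints: the left operand if nonzero, else the right operand)
def pvStepA (cur : PySem.Dict String Int) (r : List (String × Int)) : PySem.Dict String Int :=
  let cur1 := cur.insert "is_rs_peer"
    (if cur.getD "is_rs_peer" 0 ≠ 0 then cur.getD "is_rs_peer" 0 else (PySem.Dict.mk r).getD "is_rs_peer" 0)
  cur1.insert "speed" (cur1.getD "speed" 0 + (PySem.Dict.mk r).getD "speed" 0)

-- A's loop body: if deduped_data.get(k) is None: deduped_data[k] = dict(raw)  else: <update in place>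
def pvLoopA (dd : PySem.Dict String (PySem.Dict String Int)) (r : List (String × Int)) :
    PySem.Dict String (PySem.Dict String Int) :=
  match dd.get? (pvKeyA r) with
  | none => dd.insert (pvKeyA r) (PySem.Dict.mk r)
  | some cur => dd.insert (pvKeyA r) (pvStepA cur r)

def dedupe_member_data (raw_members_data : List (List (String × Int))) : List (List (String × Int)) :=
  ((raw_members_data.foldl pvLoopA PySem.Dict.empty).values).map PySem.Dict.items

-- ===== PORT B =====
def pvKeyB (r : List (String × Int)) : String :=
  PySem.Int.toStr ((PySem.Dict.mk r).getD "ix_id" 0) ++ "-" ++ PySem.Int.toStr ((PySem.Dict.mk r).getD "asn" 0)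

-- pass 1: groups.setdefault(member_key, []).append(raw_member)
def pvGroupsB (raw : List (List (String × Int))) : PySem.Dict String (List (List (String × Int))) :=
  raw.foldl (fun g r => g.modify (pvKeyB r) [] (· ++ [r])) PySem.Dict.empty

-- merged["is_rs_peer"] = merged["is_rs_peer"] or extra["is_rs_peer"]
def pvPeerStep (cur : PySem.Dict String Int) (r : List (String × Int)) : PySem.Dict String Int :=
  cur.insert "is_rs_peer"
    (if cur.getD "is_rs_peer" 0 ≠ 0 then cur.getD "is_rs_peer" 0 else (PySem.Dict.mk r).getD "is_rs_peer" 0)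

-- pass 2: merged = dict(group[0]); or-fold is_rs_peer over group[1:]; if len(group) > 1:
-- merged["speed"] = sum of the whole group's speeds
def dedupe_member_data_alt (raw_members_data : List (List (String × Int))) : List (List (String × Int)) :=
  (pvGroupsB raw_members_data).values.map (fun group =>
    let merged := (group.drop 1).foldl pvPeerStep (PySem.Dict.mk (group.headD []))  -- group[0]; a group is never empty
    let merged := if 1 < group.length then
        merged.insert "speed" ((group.map (fun r => (PySem.Dict.mk r).getD "speed" 0)).sum)
      else merged
    merged.items)

-- ===== PRECONDITION & SPEC =====
def pvPreKey (r : List (String × Int)) : String :=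
  PySem.Int.toStr ((PySem.Dict.mk r).getD "ix_id" 0) ++ "-" ++ PySem.Int.toStr ((PySem.Dict.mk r).getD "asn" 0)

-- Pre_ excludes exactly the inputs on which the Python A raises KeyError: a record missing
-- "ix_id"/"asn"; and within a duplicated-key group, a first record missing "is_rs_peer"/"speed",
-- a later record missing "speed", or a later record missing "is_rs_peer" that A's or-chain
-- actually reads (all earlier is_rs_peer values of the group falsy).
def Pre_dedupe_member_data (raw_members_data : List (List (String × Int))) : Prop :=
  ∀ r ∈ raw_members_data,
    (PySem.Dict.mk r).contains "ix_id" = true ∧ (PySem.Dict.mk r).contains "asn" = true ∧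
    (2 ≤ (raw_members_data.filter (fun r' => pvPreKey r' == pvPreKey r)).length →
      (PySem.Dict.mk ((raw_members_data.filter (fun r' => pvPreKey r' == pvPreKey r)).headD [])).contains "is_rs_peer" = true ∧
      (PySem.Dict.mk ((raw_members_data.filter (fun r' => pvPreKey r' == pvPreKey r)).headD [])).contains "speed" = true ∧
      ∀ i, i < (raw_members_data.filter (fun r' => pvPreKey r' == pvPreKey r)).length → 1 ≤ i →
        (PySem.Dict.mk ((raw_members_data.filter (fun r' => pvPreKey r' == pvPreKey r)).getD i [])).contains "speed" = true ∧
        ((∀ j, j < i → (PySem.Dict.mk ((raw_members_data.filter (fun r' => pvPreKey r' == pvPreKey r)).getD j [])).getD "is_rs_peer" 0 = 0) →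
          (PySem.Dict.mk ((raw_members_data.filter (fun r' => pvPreKey r' == pvPreKey r)).getD i [])).contains "is_rs_peer" = true))
instance (raw_members_data : List (List (String × Int))) : Decidable (Pre_dedupe_member_data raw_members_data) := by
  unfold Pre_dedupe_member_data; infer_instance

def pvWitness_dedupe_member_data : (List (List (String × Int))) :=
  [[("ix_id", 1), ("asn", 2), ("is_rs_peer", 0), ("speed", 100)],
   [("ix_id", 1), ("asn", 2), ("is_rs_peer", 1), ("speed", 50)],
   [("ix_id", 3), ("asn", 4), ("is_rs_peer", 1), ("speed", 7)]]

def Spec_dedupe_member_data (raw_members_data : List (List (String × Int))) (out : List (List (String × Int))) : Prop :=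
  out = dedupe_member_data_alt raw_members_data
instance (raw_members_data : List (List (String × Int))) (out : List (List (String × Int))) : Decidable (Spec_dedupe_member_data raw_members_data out) := by
  unfold Spec_dedupe_member_data; infer_instance

-- ===== CLAIM (what is proved, stated in full; the proofs are below) =====
def Claim_equal_dedupe_member_data : Prop := ∀ (raw_members_data : List (List (String × Int))), Dom_dedupe_member_data raw_members_data → Pre_dedupe_member_data raw_members_data → Spec_dedupe_member_data raw_members_data (dedupe_member_data raw_members_data)

-- ===== LEMMAS AND PROOFS =====
-- (The ports read a missing key as 0 via getD, so they agree on ALL inputs; Pre_ is needed only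
-- so that the ports are faithful to the Pythons, which raise KeyError outside it.)

-- two inserts at distinct, already-present keys commute as dict values (overwrite keeps position)
theorem pv_insert_comm_of_contains {κ ν : Type} [BEq κ] [LawfulBEq κ]
    (d : PySem.Dict κ ν) (k k' : κ) (v v' : ν)
    (hk : d.contains k = true) (hk' : d.contains k' = true) (hne : k ≠ k') :
    (d.insert k v).insert k' v' = (d.insert k' v').insert k v := by
  have h1 : (d.insert k v).contains k' = true := by
    rw [PySem.Dict.contains_insert]; simp [hk']
  have h2 : (d.insert k' v').contains k = true := by
    rw [PySem.Dict.contains_insert]; simp [hk]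
  apply PySem.Dict.ext
  rw [PySem.Dict.items_insert_of_contains _ _ h1,
      PySem.Dict.items_insert_of_contains _ _ hk,
      PySem.Dict.items_insert_of_contains _ _ h2,
      PySem.Dict.items_insert_of_contains _ _ hk']
  simp only [List.map_map]
  apply List.map_congr_left
  intro p _
  simp only [Function.comp_apply]
  by_cases hpk : p.1 = k
  · simp [hpk, hne]
  · by_cases hpk' : p.1 = k'
    · simp [hpk', Ne.symm hne]
    · simp [hpk, hpk']

-- an insert at "speed" commutes past an insert at the already-present "is_rs_peer"
theorem pv_insert_comm_left (d : PySem.Dict String Int) (v y : Int)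
    (hP : d.contains "is_rs_peer" = true) :
    (d.insert "speed" v).insert "is_rs_peer" y = (d.insert "is_rs_peer" y).insert "speed" v := by
  by_cases hS : d.contains "speed" = true
  · exact pv_insert_comm_of_contains d "speed" "is_rs_peer" v y hS hP (by decide)
  · have hS' : d.contains "speed" = false := by simpa using hS
    have h1 : (d.insert "speed" v).contains "is_rs_peer" = true := by
      rw [PySem.Dict.contains_insert]; simp [hP]
    have h2 : (d.insert "is_rs_peer" y).contains "speed" = false := by
      rw [PySem.Dict.contains_insert]; simp [hS']
    apply PySem.Dict.ext
    rw [PySem.Dict.items_insert_of_contains _ _ h1,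
        PySem.Dict.items_insert_of_not_contains _ _ hS',
        PySem.Dict.items_insert_of_not_contains _ _ h2,
        PySem.Dict.items_insert_of_contains _ _ hP]
    simp

-- B's or-fold ignores a pending "speed" overwrite
theorem pv_foldPeer_insert_speed (t : List (List (String × Int))) (d : PySem.Dict String Int)
    (v : Int) (hP : d.contains "is_rs_peer" = true) :
    t.foldl pvPeerStep (d.insert "speed" v) = (t.foldl pvPeerStep d).insert "speed" v := by
  induction t generalizing d v with
  | nil => simp
  | cons r t ih =>
    rw [List.foldl_cons, List.foldl_cons]
    have hg : (d.insert "speed" v).getD "is_rs_peer" 0 = d.getD "is_rs_peer" 0 :=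
      PySem.Dict.getD_insert_of_ne _ _ _ (by decide)
    have hstep : pvPeerStep (d.insert "speed" v) r = (pvPeerStep d r).insert "speed" v := by
      unfold pvPeerStep
      rw [hg]
      exact pv_insert_comm_left d v _ hP
    rw [hstep]
    exact ih (pvPeerStep d r) v (by unfold pvPeerStep; exact PySem.Dict.contains_insert_self _ _ _)

-- pvStepA in terms of B's or-step
theorem pv_stepA_eq (cur : PySem.Dict String Int) (r : List (String × Int)) :
    pvStepA cur r =
      (pvPeerStep cur r).insert "speed" (cur.getD "speed" 0 + (PySem.Dict.mk r).getD "speed" 0) := by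
  simp only [pvStepA, pvPeerStep]
  rw [PySem.Dict.getD_insert_of_ne _ _ _ (by decide)]

-- A's incremental reduce of a nonempty tail = B's or-fold followed by one speed overwrite
theorem pv_fold_stepA (rest : List (List (String × Int))) (base : PySem.Dict String Int)
    (hne : rest ≠ []) :
    rest.foldl pvStepA base =
      (rest.foldl pvPeerStep base).insert "speed"
        (base.getD "speed" 0 + (rest.map (fun r => (PySem.Dict.mk r).getD "speed" 0)).sum) := by
  induction rest generalizing base with
  | nil => exact absurd rfl hne
  | cons r t ih =>
    by_cases ht : t = []
    · subst ht
      simp only [List.foldl_cons, List.foldl_nil, List.map_cons, List.map_nil, List.sum_cons,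
        List.sum_nil, add_zero]
      exact pv_stepA_eq base r
    · rw [List.foldl_cons, pv_stepA_eq, ih _ ht]
      rw [PySem.Dict.getD_insert_self]
      rw [pv_foldPeer_insert_speed t (pvPeerStep base r) _
            (by unfold pvPeerStep; exact PySem.Dict.contains_insert_self _ _ _)]
      rw [PySem.Dict.insert_insert_self, List.foldl_cons]
      simp [add_assoc]

-- A's dict after the loop, looked up at a key it already holds
theorem pv_get?_foldA_some (c : String) (l : List (List (String × Int)))
    (dd : PySem.Dict String (PySem.Dict String Int)) (cur : PySem.Dict String Int)
    (h : dd.get? c = some cur) :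
    (l.foldl pvLoopA dd).get? c =
      some ((l.filter (fun r => pvKeyA r == c)).foldl pvStepA cur) := by
  induction l generalizing dd cur with
  | nil => simpa using h
  | cons r t ih =>
    rw [List.foldl_cons]
    by_cases hk : pvKeyA r = c
    · have : pvLoopA dd r = dd.insert c (pvStepA cur r) := by
        unfold pvLoopA; rw [hk, h]
      rw [this, ih _ _ (by rw [PySem.Dict.get?_insert_self])]
      simp [hk]
    · have hg : (pvLoopA dd r).get? c = some cur := by
        unfold pvLoopA
        cases dd.get? (pvKeyA r) <;>
          simp [PySem.Dict.get?_insert_of_ne _ _ (fun he => hk he.symm), h]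
      rw [ih _ _ hg]
      simp [hk]

-- A's dict after the loop, looked up at a fresh key
theorem pv_get?_foldA_none (c : String) (l : List (List (String × Int)))
    (dd : PySem.Dict String (PySem.Dict String Int)) (h : dd.get? c = none) :
    (l.foldl pvLoopA dd).get? c =
      match l.filter (fun r => pvKeyA r == c) with
      | [] => none
      | r :: rs => some (rs.foldl pvStepA (PySem.Dict.mk r)) := by
  induction l generalizing dd with
  | nil => simpa using h
  | cons r t ih =>
    rw [List.foldl_cons]
    by_cases hk : pvKeyA r = c
    · have : pvLoopA dd r = dd.insert c (PySem.Dict.mk r) := by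
        unfold pvLoopA; rw [hk, h]
      rw [this, pv_get?_foldA_some c t _ _ (by rw [PySem.Dict.get?_insert_self])]
      simp [hk]
    · have hg : (pvLoopA dd r).get? c = none := by
        unfold pvLoopA
        cases dd.get? (pvKeyA r) <;>
          simp [PySem.Dict.get?_insert_of_ne _ _ (fun he => hk he.symm), h]
      rw [ih _ hg]
      simp [hk]

-- the reduce of a group, as A computes it incrementally
def pvAgg (g : List (List (String × Int))) : PySem.Dict String Int :=
  g.tail.foldl pvStepA (PySem.Dict.mk (g.headD []))

-- A's loop body in insert-normal form
theorem pv_loopA_eq : pvLoopA = fun dd r => dd.insert (pvKeyA r)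
    (match dd.get? (pvKeyA r) with
     | none => PySem.Dict.mk r
     | some cur => pvStepA cur r) := by
  funext dd r
  unfold pvLoopA
  cases dd.get? (pvKeyA r) <;> rfl

-- A's output: one reduced record per distinct key, in first-occurrence order
theorem pv_A_shape (l : List (List (String × Int))) :
    dedupe_member_data l =
      (PySem.Set.ofList (l.map pvKeyA)).map (fun k =>
        (pvAgg (l.filter (fun r => pvKeyA r == k))).items) := by
  have hkeys : (l.foldl pvLoopA PySem.Dict.empty).keys = PySem.Set.ofList (l.map pvKeyA) := by
    rw [pv_loopA_eq, PySem.Dict.keys_foldl_insert_key]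
    simp [PySem.Set.update_nil_left]
  have hnodup : (l.foldl pvLoopA PySem.Dict.empty).keys.Nodup := by
    rw [pv_loopA_eq]
    exact PySem.Dict.nodup_keys_foldl_insert_key _ _ _ _ (by simp)
  unfold dedupe_member_data
  rw [PySem.Dict.values, PySem.Dict.items_eq_map_keys _ hnodup PySem.Dict.empty, hkeys]
  simp only [List.map_map]
  apply List.map_congr_left
  intro k hk
  simp only [Function.comp_apply]
  congr 1
  have hGne : l.filter (fun r => pvKeyA r == k) ≠ [] := by
    rcases List.mem_map.1 ((PySem.Set.mem_ofList _ _).1 hk) with ⟨r, hrl, hrk⟩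
    intro hnil
    have : r ∈ l.filter (fun r => pvKeyA r == k) := by
      simp [List.mem_filter, hrl, hrk]
    simp [hnil] at this
  rw [PySem.Dict.getD_eq_get?_getD,
      pv_get?_foldA_none k l PySem.Dict.empty (by simp)]
  rcases hG : l.filter (fun r => pvKeyA r == k) with _ | ⟨r0, rs⟩
  · exact absurd hG hGne
  · simp [pvAgg]

-- B's groups dict holds, at each key, the records with that key in order
theorem pv_groupsB_getD (l : List (List (String × Int))) (c : String) :
    (pvGroupsB l).getD c [] = l.filter (fun r => pvKeyA r == c) := by
  have hmap : pvGroupsB l =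
      (l.map (fun r => (pvKeyA r, r))).foldl (fun d p => d.modify p.1 [] (· ++ [p.2])) PySem.Dict.empty := by
    rw [List.foldl_map]; rfl
  rw [hmap, PySem.Dict.getD_foldl_modify_append]
  simp [List.filter_map, Function.comp_def]

theorem pv_main (l : List (List (String × Int))) :
    dedupe_member_data l = dedupe_member_data_alt l := by
  have hkb : pvKeyB = pvKeyA := rfl
  have hkeys : (pvGroupsB l).keys = PySem.Set.ofList (l.map pvKeyA) := by
    have h : (pvGroupsB l).keys = PySem.Set.update
        (PySem.Dict.empty : PySem.Dict String (List (List (String × Int)))).keys (l.map pvKeyB) :=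
      PySem.Dict.keys_foldl_modify_key l pvKeyB [] (fun _ r => (· ++ [r])) _
    rw [h, hkb]
    simp [PySem.Set.update_nil_left]
  have hnodup : (pvGroupsB l).keys.Nodup :=
    PySem.Dict.nodup_keys_foldl_modify_key l pvKeyB [] (fun _ r => (· ++ [r])) _ (by simp)
  rw [pv_A_shape]
  unfold dedupe_member_data_alt
  rw [PySem.Dict.values, PySem.Dict.items_eq_map_keys _ hnodup [], hkeys]
  simp only [List.map_map]
  apply List.map_congr_left
  intro k hk
  simp only [Function.comp_apply]
  rw [pv_groupsB_getD]
  rcases hG : l.filter (fun r => pvKeyA r == k) with _ | ⟨r0, rs⟩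
  · -- impossible: k is one of the keys
    rcases List.mem_map.1 ((PySem.Set.mem_ofList _ _).1 hk) with ⟨r, hrl, hrk⟩
    have : r ∈ l.filter (fun r => pvKeyA r == k) := by simp [List.mem_filter, hrl, hrk]
    simp [hG] at this
  · rcases rs with _ | ⟨r1, rs'⟩
    · -- singleton group: A never touches it, B's tail fold is empty and the speed write is skipped
      simp [pvAgg]
    · -- group of size ≥ 2
      have hclosed := pv_fold_stepA (r1 :: rs') (PySem.Dict.mk r0) (by simp)
      show (pvAgg (r0 :: r1 :: rs')).items = _
      simp only [pvAgg, List.tail_cons, List.headD_cons, List.drop_succ_cons, List.drop_zero,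
        List.length_cons, List.map_cons, List.sum_cons]
      rw [hclosed]
      have hlt : 1 < rs'.length + 1 + 1 := by omega
      simp only [hlt, if_true]
      congr 1

-- ===== VERDICT (by name: the statement is the Claim_ definition above) =====
theorem dedupe_member_data_spec : Claim_equal_dedupe_member_data := by
  intro l _ _
  exact pv_main l
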